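-- pv_equiv track=rewrite | github.com/amralyticsteam/analytics_demo | analyses/basket_analysis.py | abbreviate_service_name
-- ===== SOURCE A (Python) =====
-- def abbreviate_service_name(service_name, max_length=25):
--     """Abbreviate service names for better visualization display."""
--     # Common abbreviations
--     abbrev_map = {
--         'Installation': 'Install',
--         'Replacement': 'Replace',
--         'Inspection': 'Inspect',
--         'Cleaning': 'Clean',
--         'Thermostat': 'Tstat',
--         'Refrigerant': 'Refrig',
--         'Condenser': 'Cond',
--         'Evaporator': 'Evap',
--         'Compressor': 'Comp',
--         'Heat Exchanger': 'HX',
--         'Air Handler': 'AH',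
--         'Mini-Split': 'Mini',
--     }
--
--     # Apply abbreviations
--     abbreviated = service_name
--     for full, abbrev in abbrev_map.items():
--         abbreviated = abbreviated.replace(full, abbrev)
--
--     # If still too long, truncate with ellipsis
--     if len(abbreviated) > max_length:
--         abbreviated = abbreviated[:max_length-3] + '...'
--
--     return abbreviated
-- ===== SOURCE B (Python) =====
-- def abbreviate_service_name(service_name, max_length=25):
--     """Abbreviate service names for better visualization display."""
--     # Same abbreviation table, as an ordered list of (full, abbrev) pairs.
--     table = [
--         ('Installation', 'Install'),
--         ('Replacement', 'Replace'),
--         ('Inspection', 'Inspect'),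
--         ('Cleaning', 'Clean'),
--         ('Thermostat', 'Tstat'),
--         ('Refrigerant', 'Refrig'),
--         ('Condenser', 'Cond'),
--         ('Evaporator', 'Evap'),
--         ('Compressor', 'Comp'),
--         ('Heat Exchanger', 'HX'),
--         ('Air Handler', 'AH'),
--         ('Mini-Split', 'Mini'),
--     ]
--     # Single left-to-right pass: at each position try the table in order,
--     # emit the abbreviation and skip the match, else copy one character.
--     out = []
--     i = 0
--     n = len(service_name)
--     while i < n:
--         for full, abbrev in table:
--             if service_name.startswith(full, i):
--                 out.append(abbrev)
--                 i += len(full)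
--                 break
--         else:
--             out.append(service_name[i])
--             i += 1
--     abbreviated = ''.join(out)
--     return abbreviated if len(abbreviated) <= max_length else abbreviated[:max_length - 3] + '...'
-- ===== Notes on version B (the rewrite author's own statement) =====
-- stated objective: alternative
-- what changed: A makes twelve sequential full-string .replace passes (one per abbreviation); B makes a single left-to-right scan with an output accumulator that tries the abbreviation table at each position, emits the abbreviation and skips the match (table order = A's replace priority), then applies the identical truncation.
import Mathlib
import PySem

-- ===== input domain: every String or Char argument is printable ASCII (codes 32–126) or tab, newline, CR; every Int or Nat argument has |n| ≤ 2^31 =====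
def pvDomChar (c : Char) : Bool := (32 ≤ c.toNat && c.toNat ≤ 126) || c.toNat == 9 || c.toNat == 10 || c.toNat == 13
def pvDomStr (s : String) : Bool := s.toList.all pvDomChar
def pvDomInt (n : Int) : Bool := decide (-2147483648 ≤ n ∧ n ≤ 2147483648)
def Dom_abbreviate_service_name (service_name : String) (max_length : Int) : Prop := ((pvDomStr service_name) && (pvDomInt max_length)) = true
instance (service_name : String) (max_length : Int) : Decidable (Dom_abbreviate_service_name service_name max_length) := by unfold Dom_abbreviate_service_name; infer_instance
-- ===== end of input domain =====

-- B replaces A's twelve sequential full-string `.replace` passes by ONE left-to-right scan with an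
-- output accumulator that tries the abbreviation table at each position (first match in table order
-- wins, = A's replace priority); the final truncation step computes the same string.

-- ===== PORT A =====
-- A's abbrev_map dict, iterated with .items(): an insertion-ordered pair list over code points.
def pvAbbrevMap : List (List Char × List Char) := [
  ("Installation".toList, "Install".toList),
  ("Replacement".toList, "Replace".toList),
  ("Inspection".toList, "Inspect".toList),
  ("Cleaning".toList, "Clean".toList),
  ("Thermostat".toList, "Tstat".toList),
  ("Refrigerant".toList, "Refrig".toList),
  ("Condenser".toList, "Cond".toList),
  ("Evaporator".toList, "Evap".toList),
  ("Compressor".toList, "Comp".toList),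
  ("Heat Exchanger".toList, "HX".toList),
  ("Air Handler".toList, "AH".toList),
  ("Mini-Split".toList, "Mini".toList)]

def abbreviate_service_name (service_name : String) (max_length : Int) : String :=
  -- abbreviated = service_name; for full, abbrev in abbrev_map.items(): abbreviated = abbreviated.replace(full, abbrev)
  let abbreviated := pvAbbrevMap.foldl (fun acc p => PySem.Chars.replace acc p.1 p.2) service_name.toList
  -- if len(abbreviated) > max_length: abbreviated = abbreviated[:max_length-3] + '...'
  if (abbreviated.length : Int) > max_length then
    String.ofList (PySem.Chars.slice abbreviated none (some (max_length - 3)) ++ "...".toList)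
  else
    String.ofList abbreviated

-- ===== PORT B =====
-- Source B's `table` of (full, abbrev) string pairs.
def pvBTable : List (String × String) := [
  ("Installation", "Install"), ("Replacement", "Replace"), ("Inspection", "Inspect"),
  ("Cleaning", "Clean"), ("Thermostat", "Tstat"), ("Refrigerant", "Refrig"),
  ("Condenser", "Cond"), ("Evaporator", "Evap"), ("Compressor", "Comp"),
  ("Heat Exchanger", "HX"), ("Air Handler", "AH"), ("Mini-Split", "Mini")]

-- Source B's while-loop over positions, with the emitted output kept REVERSED in the accumulator `acc`
-- (Source B's `out` list); fuel = number of characters left (each iteration consumes ≥ 1).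
def pvEmit : Nat → List Char → List Char → List Char
  | _, [], acc => acc.reverse
  | 0, rest, acc => acc.reverse ++ rest
  | fuel + 1, c :: rest, acc =>
    match pvBTable.find? (fun e => e.1.toList.isPrefixOf (c :: rest)) with
    | some e => pvEmit fuel (List.drop e.1.toList.length (c :: rest)) (e.2.toList.reverse ++ acc)
    | none => pvEmit fuel rest (c :: acc)

-- abbreviated[:max_length-3], written out: a nonnegative stop takes from the front,
-- a negative stop drops that many characters from the end (exactly Python's slice rule).
def pvClip (chars : List Char) (m : Int) : List Char :=
  if 3 ≤ m then chars.take (m - 3).toNat else chars.take (chars.length - (3 - m).toNat)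

def abbreviate_service_name_alt (service_name : String) (max_length : Int) : String :=
  let abbreviated := pvEmit service_name.length service_name.toList []
  -- return abbreviated if len(abbreviated) <= max_length else abbreviated[:max_length-3] + '...'
  if (abbreviated.length : Int) ≤ max_length then String.ofList abbreviated
  else String.ofList (pvClip abbreviated max_length ++ ['.', '.', '.'])

-- ===== PRECONDITION & SPEC =====
def Spec_abbreviate_service_name (service_name : String) (max_length : Int) (out : String) : Prop := out = abbreviate_service_name_alt service_name max_length
instance (service_name : String) (max_length : Int) (out : String) : Decidable (Spec_abbreviate_service_name service_name max_length out) := by unfold Spec_abbreviate_service_name; infer_instance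

-- ===== CLAIM (what is proved, stated in full; the proofs are below) =====
def Claim_equal_abbreviate_service_name : Prop := ∀ (service_name : String) (max_length : Int), Dom_abbreviate_service_name service_name max_length → Spec_abbreviate_service_name service_name max_length (abbreviate_service_name service_name max_length)

-- ===== LEMMAS AND PROOFS =====

-- Reference one-pass scan (no accumulator), used to relate the two ports.
def pvScanGo (ks : List (List Char × List Char)) : Nat → List Char → List Char
  | _, [] => []
  | 0, l => l
  | n+1, c :: t =>
    match ks.find? (fun p => p.1.isPrefixOf (c :: t)) with
    | some (k, a) => a ++ pvScanGo ks n (List.drop k.length (c :: t))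
    | none => c :: pvScanGo ks n t

-- Scan with the intended fuel (the length of the string being scanned).
def pvScanA (ks : List (List Char × List Char)) (s : List Char) : List Char := pvScanGo ks s.length s

-- All keys of the table are nonempty.
def pvNE (ks : List (List Char × List Char)) : Prop := ∀ p ∈ ks, p.1 ≠ []

-- The (decidable, finite) disjointness conditions under which sequential replacement and the
-- one-pass scan coincide: going down the table, for each pair (k, a) and each LATER pair p:
-- no nonempty suffix of the abbreviation a is prefix-comparable with the later key p.1 (so later keys
-- never match inside or across an emitted abbreviation), and no proper nonempty suffix of the later
-- key p.1 is prefix-comparable with k or with a (so an occurrence of a later key is never destroyed by,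
-- nor fabricated from, an earlier replacement); later keys are pairwise prefix-incomparable.
def pvGood : List (List Char × List Char) → Prop
  | [] => True
  | (k, a) :: ks =>
      k ≠ [] ∧
      (∀ p ∈ ks, ∀ u ∈ a.tails, u ≠ [] → ¬ p.1 <+: u ∧ ¬ u <+: p.1) ∧
      (∀ p ∈ ks, ∀ u ∈ p.1.tails, u ≠ p.1 → u ≠ [] → (¬ k <+: u ∧ ¬ u <+: k) ∧ (¬ u <+: a ∧ ¬ a <+: u)) ∧
      List.Pairwise (fun p q => ¬ p.1 <+: q.1 ∧ ¬ q.1 <+: p.1) ks ∧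
      pvGood ks

set_option maxHeartbeats 1000000 in
theorem pvGood_abbrevMap : pvGood pvAbbrevMap := by
  simp only [pvAbbrevMap, pvGood]
  repeat' apply And.intro
  all_goals decide

theorem pvNE_of_good : ∀ ks, pvGood ks → pvNE ks := by
  intro ks
  induction ks with
  | nil => intro _ p hp; cases hp
  | cons q ks ih =>
    obtain ⟨k, a⟩ := q
    intro hg p hp
    rcases List.mem_cons.mp hp with rfl | hp
    · exact hg.1
    · exact ih hg.2.2.2.2 p hp

-- x is a prefix of y ++ t only if x, y are prefix-comparable.
theorem pv_prefix_append_cases {x y t : List Char} (h : x <+: y ++ t) : x <+: y ∨ y <+: x := by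
  rcases h with ⟨u, hu⟩
  rcases le_or_gt x.length y.length with hle | hlt
  · left
    have hx : x = (y ++ t).take x.length := by rw [← hu]; simp
    rw [List.take_append_of_le_length hle] at hx
    exact hx ▸ List.take_prefix _ _
  · right
    have hy : y = x.take y.length := by
      have h' : y = ((x ++ u).take y.length) := by rw [hu]; simp
      rw [List.take_append_of_le_length (by omega)] at h'
      exact h'
    exact hy ▸ List.take_prefix _ _

-- ---- Characterisation of PySem.Chars.replace (Python str.replace, nonempty pattern) ----
theorem pv_go_zero (old new l acc : List Char) :
    PySem.Chars.replace.go old new 0 l acc = acc.reverse ++ l := by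
  rw [PySem.Chars.replace.go]

theorem pv_go_succ_nil (old new acc : List Char) (n : Nat) :
    PySem.Chars.replace.go old new (n+1) [] acc = acc.reverse := by
  rw [PySem.Chars.replace.go]; simp

theorem pv_go_succ_cons (old new : List Char) (n : Nat) (c : Char) (t acc : List Char) :
    PySem.Chars.replace.go old new (n+1) (c :: t) acc =
      if old.isPrefixOf (c :: t) = true then
        PySem.Chars.replace.go old new n (List.drop old.length (c :: t)) (new.reverse ++ acc)
      else PySem.Chars.replace.go old new n t (c :: acc) := by
  rw [PySem.Chars.replace.go]

theorem pv_go_acc (old new : List Char) : ∀ (n : Nat) (l acc : List Char),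
    PySem.Chars.replace.go old new n l acc = acc.reverse ++ PySem.Chars.replace.go old new n l [] := by
  intro n
  induction n with
  | zero => intro l acc; rw [pv_go_zero, pv_go_zero]; simp
  | succ n ih =>
    intro l acc
    cases l with
    | nil => rw [pv_go_succ_nil, pv_go_succ_nil]; simp
    | cons c t =>
      rw [pv_go_succ_cons, pv_go_succ_cons]
      by_cases h : old.isPrefixOf (c :: t) = true
      · simp only [h, if_true]
        rw [ih _ (new.reverse ++ acc), ih _ (new.reverse ++ [])]
        simp
      · simp only [h]
        rw [ih t (c :: acc), ih t (c :: ([] : List Char))]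
        simp

theorem pv_go_fuel (old new : List Char) (hk : old ≠ []) : ∀ (n m : Nat) (l : List Char),
    l.length ≤ n → l.length ≤ m →
    PySem.Chars.replace.go old new n l [] = PySem.Chars.replace.go old new m l [] := by
  intro n
  induction n with
  | zero =>
    intro m l hn _
    have : l = [] := List.length_eq_zero_iff.mp (Nat.le_zero.mp hn)
    subst this
    cases m with
    | zero => rfl
    | succ m => rw [pv_go_zero, pv_go_succ_nil]; simp
  | succ n ih =>
    intro m l hn hm
    cases l with
    | nil =>
      cases m with
      | zero => rw [pv_go_zero, pv_go_succ_nil]; simp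
      | succ m => rw [pv_go_succ_nil, pv_go_succ_nil]
    | cons c t =>
      cases m with
      | zero => simp at hm
      | succ m =>
        rw [pv_go_succ_cons, pv_go_succ_cons]
        have hol : 1 ≤ old.length := List.length_pos_iff.mpr hk
        by_cases h : old.isPrefixOf (c :: t) = true
        · rw [if_pos h, if_pos h]
          have hd : (List.drop old.length (c :: t)).length ≤ n := by
            simp only [List.length_drop, List.length_cons] at *
            omega
          have hd' : (List.drop old.length (c :: t)).length ≤ m := by
            simp only [List.length_drop, List.length_cons] at *
            omega
          rw [pv_go_acc _ _ n, pv_go_acc _ _ m, ih m _ hd hd']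
        · rw [if_neg h, if_neg h]
          have ht : t.length ≤ n := by simp only [List.length_cons] at hn; omega
          have ht' : t.length ≤ m := by simp only [List.length_cons] at hm; omega
          rw [pv_go_acc _ _ n, pv_go_acc _ _ m, ih m t ht ht']

theorem pv_rep_nil (old new : List Char) (hk : old ≠ []) : PySem.Chars.replace [] old new = [] := by
  unfold PySem.Chars.replace
  simp [List.isEmpty_eq_false_iff.mpr hk, pv_go_zero]

theorem pv_rep_match {old s : List Char} (new : List Char) (hk : old ≠ []) (h : old <+: s) :
    PySem.Chars.replace s old new = new ++ PySem.Chars.replace (List.drop old.length s) old new := by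
  have hol : 1 ≤ old.length := List.length_pos_iff.mpr hk
  cases s with
  | nil => exact absurd (List.prefix_nil.mp h) hk
  | cons c t =>
    unfold PySem.Chars.replace
    simp only [List.isEmpty_eq_false_iff.mpr hk, Bool.false_eq_true, if_false, List.length_cons]
    rw [pv_go_succ_cons]
    simp only [List.isPrefixOf_iff_prefix.mpr h, if_true]
    rw [pv_go_acc]
    simp only [List.reverse_reverse, List.append_nil]
    congr 1
    exact pv_go_fuel old new hk t.length _ _ (by simp [List.length_drop]; omega) (le_refl _)

theorem pv_rep_nomatch {old : List Char} {c : Char} {t : List Char} (new : List Char) (hk : old ≠ [])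
    (h : ¬ old <+: (c :: t)) :
    PySem.Chars.replace (c :: t) old new = c :: PySem.Chars.replace t old new := by
  unfold PySem.Chars.replace
  simp only [List.isEmpty_eq_false_iff.mpr hk, Bool.false_eq_true, if_false, List.length_cons]
  rw [pv_go_succ_cons]
  have : old.isPrefixOf (c :: t) = false := by
    rw [Bool.eq_false_iff]
    intro hc
    exact h (List.isPrefixOf_iff_prefix.mp hc)
  simp only [this, Bool.false_eq_true, if_false]
  rw [pv_go_acc]
  rfl

-- ---- Unfolding pvScanA ----
theorem pv_scanGo_nil (ks : List (List Char × List Char)) (n : Nat) : pvScanGo ks n [] = [] := by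
  cases n <;> rfl

theorem pv_scanGo_succ_cons (ks : List (List Char × List Char)) (n : Nat) (c : Char) (t : List Char) :
    pvScanGo ks (n+1) (c :: t) =
      match ks.find? (fun p => p.1.isPrefixOf (c :: t)) with
      | some (k, a) => a ++ pvScanGo ks n (List.drop k.length (c :: t))
      | none => c :: pvScanGo ks n t := by
  rfl

theorem pv_scanGo_fuel {ks : List (List Char × List Char)} (hne : pvNE ks) : ∀ (n m : Nat) (l : List Char),
    l.length ≤ n → l.length ≤ m → pvScanGo ks n l = pvScanGo ks m l := by
  intro n
  induction n with
  | zero =>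
    intro m l hn _
    have : l = [] := List.length_eq_zero_iff.mp (Nat.le_zero.mp hn)
    subst this
    rw [pv_scanGo_nil, pv_scanGo_nil]
  | succ n ih =>
    intro m l hn hm
    cases l with
    | nil => rw [pv_scanGo_nil, pv_scanGo_nil]
    | cons c t =>
      cases m with
      | zero => simp at hm
      | succ m =>
        rw [pv_scanGo_succ_cons, pv_scanGo_succ_cons]
        cases hf : ks.find? (fun p => p.1.isPrefixOf (c :: t)) with
        | none =>
          simp only []
          have ht : t.length ≤ n := by simp only [List.length_cons] at hn; omega
          have ht' : t.length ≤ m := by simp only [List.length_cons] at hm; omega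
          rw [ih m t ht ht']
        | some p =>
          obtain ⟨k, a⟩ := p
          simp only []
          have hkne : k ≠ [] := hne _ (List.mem_of_find?_eq_some hf)
          have hkl : 1 ≤ k.length := List.length_pos_iff.mpr hkne
          have hd : (List.drop k.length (c :: t)).length ≤ n := by
            simp only [List.length_drop, List.length_cons] at *; omega
          have hd' : (List.drop k.length (c :: t)).length ≤ m := by
            simp only [List.length_drop, List.length_cons] at *; omega
          rw [ih m _ hd hd']

theorem pv_scanA_cons_some {ks : List (List Char × List Char)} (hne : pvNE ks) {s k a : List Char}
    (hs : s ≠ []) (h : ks.find? (fun p => p.1.isPrefixOf s) = some (k, a)) :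
    pvScanA ks s = a ++ pvScanA ks (List.drop k.length s) := by
  cases s with
  | nil => exact absurd rfl hs
  | cons c t =>
    have hkne : k ≠ [] := hne _ (List.mem_of_find?_eq_some h)
    have hkl : 1 ≤ k.length := List.length_pos_iff.mpr hkne
    show pvScanGo ks (t.length + 1) (c :: t) = _
    rw [pv_scanGo_succ_cons, h]
    simp only []
    congr 1
    exact pv_scanGo_fuel hne t.length _ _ (by simp only [List.length_drop, List.length_cons]; omega) (le_refl _)

theorem pv_scanA_cons_none {ks : List (List Char × List Char)} {c : Char} {t : List Char}
    (h : ks.find? (fun p => p.1.isPrefixOf (c :: t)) = none) :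
    pvScanA ks (c :: t) = c :: pvScanA ks t := by
  show pvScanGo ks (t.length + 1) (c :: t) = _
  rw [pv_scanGo_succ_cons, h]
  rfl

-- Scanning skips over a block w in which no key matches.
theorem pv_scan_append {ks : List (List Char × List Char)} : ∀ (w t : List Char),
    (∀ u ∈ w.tails, u ≠ [] → ∀ p ∈ ks, ¬ p.1 <+: (u ++ t)) →
    pvScanA ks (w ++ t) = w ++ pvScanA ks t := by
  intro w
  induction w with
  | nil => intro t _; simp
  | cons c w' ih =>
    intro t h
    have hfind : ks.find? (fun p => p.1.isPrefixOf (c :: (w' ++ t))) = none := by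
      rw [List.find?_eq_none]
      intro p hp
      simp only [List.isPrefixOf_iff_prefix]
      exact h (c :: w') (by simp [List.mem_tails]) (by simp) p hp
    rw [List.cons_append, pv_scanA_cons_none hfind, ih t (fun u hu hune p hp =>
      h u (by rcases (List.mem_tails _ _).mp hu with hsuf; exact (List.mem_tails _ _).mpr (hsuf.trans (List.suffix_cons _ _))) hune p hp)]
    rfl

-- Replacement skips over a block w in which the pattern does not match.
theorem pv_rep_append {old : List Char} (new : List Char) (hk : old ≠ []) : ∀ (w t : List Char),
    (∀ u ∈ w.tails, u ≠ [] → ¬ old <+: (u ++ t)) →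
    PySem.Chars.replace (w ++ t) old new = w ++ PySem.Chars.replace t old new := by
  intro w
  induction w with
  | nil => intro t _; simp
  | cons c w' ih =>
    intro t h
    have hnm : ¬ old <+: (c :: (w' ++ t)) := h (c :: w') (by simp [List.mem_tails]) (by simp)
    rw [List.cons_append, pv_rep_nomatch new hk hnm, ih t (fun u hu hune =>
      h u ((List.mem_tails _ _).mpr (((List.mem_tails _ _).mp hu).trans (List.suffix_cons _ _))) hune)]
    rfl

-- A pattern-free word u matching the head of a replacement output already matched the head of the input.
theorem pv_match_of_match_rep {old new : List Char} (hk : old ≠ []) : ∀ (t u : List Char),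
    u ≠ [] → (∀ v ∈ u.tails, v ≠ [] → ¬ v <+: new ∧ ¬ new <+: v) →
    u <+: PySem.Chars.replace t old new → u <+: t := by
  intro t
  induction t with
  | nil =>
    intro u hu _ hpre
    rw [pv_rep_nil old new hk] at hpre
    exact absurd (List.prefix_nil.mp hpre) hu
  | cons c t' ih =>
    intro u hu hcond hpre
    by_cases hp : old <+: (c :: t')
    · rw [pv_rep_match new hk hp] at hpre
      rcases pv_prefix_append_cases hpre with h1 | h1
      · exact absurd h1 (hcond u ((List.mem_tails _ _).mpr (List.suffix_refl u)) hu).1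
      · exact absurd h1 (hcond u ((List.mem_tails _ _).mpr (List.suffix_refl u)) hu).2
    · rw [pv_rep_nomatch new hk hp] at hpre
      cases u with
      | nil => exact absurd rfl hu
      | cons d u' =>
        rw [List.cons_prefix_cons] at hpre
        obtain ⟨rfl, hpre'⟩ := hpre
        by_cases hu' : u' = []
        · subst hu'
          exact List.cons_prefix_cons.mpr ⟨rfl, List.nil_prefix⟩
        · have hsub : ∀ v ∈ u'.tails, v ≠ [] → ¬ v <+: new ∧ ¬ new <+: v := fun v hv hvne =>
            hcond v ((List.mem_tails _ _).mpr (((List.mem_tails _ _).mp hv).trans (List.suffix_cons _ _))) hvne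
          exact List.cons_prefix_cons.mpr ⟨rfl, ih u' hu' hsub hpre'⟩

-- The first table match survives replacing a suffix (keys pairwise prefix-incomparable).
theorem pv_find_transfer {s : List Char} {kj aj : List Char} : ∀ (ks : List (List Char × List Char)),
    List.Pairwise (fun p q => ¬ p.1 <+: q.1 ∧ ¬ q.1 <+: p.1) ks →
    ks.find? (fun p => p.1.isPrefixOf s) = some (kj, aj) →
    ∀ r : List Char, ks.find? (fun p => p.1.isPrefixOf (kj ++ r)) = some (kj, aj) := by
  intro ks
  induction ks with
  | nil => intro _ h; simp at h
  | cons p ks ih =>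
    intro h3 hfind r
    by_cases hp : p.1.isPrefixOf s = true
    · rw [List.find?_cons_of_pos (p := fun q : List Char × List Char => q.1.isPrefixOf s) hp] at hfind
      injection hfind with hfind
      subst hfind
      exact List.find?_cons_of_pos (p := fun q : List Char × List Char => q.1.isPrefixOf ((kj, aj).1 ++ r))
        (List.isPrefixOf_iff_prefix.mpr (List.prefix_append _ _))
    · rw [List.find?_cons_of_neg (p := fun q : List Char × List Char => q.1.isPrefixOf s) (by simpa using hp)] at hfind
      have hmem : (kj, aj) ∈ ks := List.mem_of_find?_eq_some hfind
      have hnp := (List.pairwise_cons.mp h3).1 _ hmem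
      have : ¬ p.1.isPrefixOf (kj ++ r) = true := by
        rw [List.isPrefixOf_iff_prefix]
        intro hc
        rcases pv_prefix_append_cases hc with hc | hc
        · exact hnp.1 hc
        · exact hnp.2 hc
      rw [List.find?_cons_of_neg (p := fun q : List Char × List Char => q.1.isPrefixOf (kj ++ r)) (by simpa using this)]
      exact ih (List.pairwise_cons.mp h3).2 hfind r

-- MAIN LEMMA: scanning with (k,a) as the top pair = replacing k first, then scanning with the rest.
theorem pv_scan_cons_eq_rep {k a : List Char} {ks : List (List Char × List Char)}
    (hk : k ≠ []) (hne : pvNE ks)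
    (h1 : ∀ p ∈ ks, ∀ u ∈ a.tails, u ≠ [] → ¬ p.1 <+: u ∧ ¬ u <+: p.1)
    (h2 : ∀ p ∈ ks, ∀ u ∈ p.1.tails, u ≠ p.1 → u ≠ [] → (¬ k <+: u ∧ ¬ u <+: k) ∧ (¬ u <+: a ∧ ¬ a <+: u))
    (h3 : List.Pairwise (fun p q => ¬ p.1 <+: q.1 ∧ ¬ q.1 <+: p.1) ks) :
    ∀ s, pvScanA ((k, a) :: ks) s = pvScanA ks (PySem.Chars.replace s k a) := by
  have hne' : pvNE ((k, a) :: ks) := by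
    intro p hp
    rcases List.mem_cons.mp hp with rfl | hp
    · exact hk
    · exact hne p hp
  have hkl : 1 ≤ k.length := List.length_pos_iff.mpr hk
  suffices H : ∀ n s, s.length ≤ n → pvScanA ((k, a) :: ks) s = pvScanA ks (PySem.Chars.replace s k a) by
    intro s; exact H s.length s (le_refl _)
  intro n
  induction n with
  | zero =>
    intro s hs
    have : s = [] := List.length_eq_zero_iff.mp (Nat.le_zero.mp hs)
    subst this
    rw [pv_rep_nil k a hk]
    rfl
  | succ n ih =>
    intro s hs
    cases s with
    | nil => rw [pv_rep_nil k a hk]; rfl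
    | cons c t =>
      simp only [List.length_cons] at hs
      by_cases hks : k <+: (c :: t)
      · have hfind : ((k, a) :: ks).find? (fun p => p.1.isPrefixOf (c :: t)) = some (k, a) :=
          List.find?_cons_of_pos (p := fun q : List Char × List Char => q.1.isPrefixOf (c :: t))
            (List.isPrefixOf_iff_prefix.mpr hks)
        have cond1 : ∀ u ∈ a.tails, u ≠ [] → ∀ p ∈ ks,
            ¬ p.1 <+: (u ++ PySem.Chars.replace (List.drop k.length (c :: t)) k a) := by
          intro u hu hune p hp hc
          rcases pv_prefix_append_cases hc with hc | hc
          · exact (h1 p hp u hu hune).1 hc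
          · exact (h1 p hp u hu hune).2 hc
        rw [pv_scanA_cons_some hne' (List.cons_ne_nil _ _) hfind, pv_rep_match a hk hks,
          pv_scan_append a _ cond1]
        congr 1
        exact ih _ (by simp only [List.length_drop, List.length_cons]; omega)
      · cases hfind : ks.find? (fun p => p.1.isPrefixOf (c :: t)) with
        | some pj =>
          obtain ⟨kj, aj⟩ := pj
          have hmem : (kj, aj) ∈ ks := List.mem_of_find?_eq_some hfind
          have hkjne : kj ≠ [] := hne _ hmem
          have hkjl : 1 ≤ kj.length := List.length_pos_iff.mpr hkjne
          have hkj_pre : kj <+: (c :: t) := by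
            have h' := List.find?_some hfind
            simpa only [List.isPrefixOf_iff_prefix] using h'
          obtain ⟨s₁, hs₁⟩ := hkj_pre
          have hLfind : ((k, a) :: ks).find? (fun p => p.1.isPrefixOf (c :: t)) = some (kj, aj) := by
            rw [List.find?_cons_of_neg (p := fun q : List Char × List Char => q.1.isPrefixOf (c :: t))
              (by simp only [List.isPrefixOf_iff_prefix]; exact hks)]
            exact hfind
          have cond2 : ∀ u ∈ kj.tails, u ≠ [] → ¬ k <+: (u ++ s₁) := by
            intro u hu hune hc
            by_cases hukj : u = kj
            · subst hukj
              rw [hs₁] at hc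
              exact hks hc
            · have h2' := (h2 (kj, aj) hmem u hu hukj hune).1
              rcases pv_prefix_append_cases hc with hc | hc
              · exact h2'.1 hc
              · exact h2'.2 hc
          have hdrop : List.drop kj.length (c :: t) = s₁ := by rw [← hs₁]; exact List.drop_left
          have hrep : PySem.Chars.replace (c :: t) k a = kj ++ PySem.Chars.replace s₁ k a := by
            rw [← hs₁]; exact pv_rep_append a hk kj s₁ cond2
          have hfind2 := pv_find_transfer ks h3 hfind (PySem.Chars.replace s₁ k a)
          have hlen : kj.length + s₁.length = t.length + 1 := by
            have := congrArg List.length hs₁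
            simp only [List.length_append, List.length_cons] at this
            omega
          rw [pv_scanA_cons_some hne' (List.cons_ne_nil _ _) hLfind, hdrop, hrep,
            pv_scanA_cons_some hne (by simp [hkjne]) hfind2, List.drop_left]
          congr 1
          exact ih s₁ (by omega)
        | none =>
          have hall : ∀ p ∈ ks, ¬ p.1 <+: (c :: t) := by
            intro p hp hc
            have := List.find?_eq_none.mp hfind p hp
            simp only [List.isPrefixOf_iff_prefix] at this
            exact this hc
          have hLfind : ((k, a) :: ks).find? (fun p => p.1.isPrefixOf (c :: t)) = none := by
            rw [List.find?_cons_of_neg (p := fun q : List Char × List Char => q.1.isPrefixOf (c :: t))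
              (by simp only [List.isPrefixOf_iff_prefix]; exact hks)]
            exact hfind
          have hfind2 : ks.find? (fun p => p.1.isPrefixOf (c :: PySem.Chars.replace t k a)) = none := by
            rw [List.find?_eq_none]
            intro p hp
            simp only [List.isPrefixOf_iff_prefix]
            intro hc
            obtain ⟨kj, aj⟩ := p
            have hkjne : kj ≠ [] := hne _ hp
            cases kj with
            | nil => exact hkjne rfl
            | cons d kj' =>
              rw [List.cons_prefix_cons] at hc
              obtain ⟨hdc, hc'⟩ := hc
              by_cases hkj' : kj' = []
              · subst hkj'
                exact hall _ hp (List.cons_prefix_cons.mpr ⟨hdc, List.nil_prefix⟩)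
              · have cond3 : ∀ v ∈ kj'.tails, v ≠ [] → ¬ v <+: a ∧ ¬ a <+: v := by
                  intro v hv hvne
                  have hvkj : v ∈ (d :: kj').tails :=
                    (List.mem_tails _ _).mpr (((List.mem_tails _ _).mp hv).trans (List.suffix_cons _ _))
                  have hvne' : v ≠ d :: kj' := by
                    intro hvk
                    have := ((List.mem_tails _ _).mp hv).length_le
                    rw [hvk] at this
                    simp at this
                  exact (h2 (d :: kj', aj) hp v hvkj hvne' hvne).2
                have := pv_match_of_match_rep hk t kj' hkj' cond3 hc'
                exact hall _ hp (List.cons_prefix_cons.mpr ⟨hdc, this⟩)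
          rw [pv_scanA_cons_none hLfind, pv_rep_nomatch a hk hks, pv_scanA_cons_none hfind2]
          rw [ih t (by omega)]

theorem pv_scan_nil_keys : ∀ s, pvScanA [] s = s := by
  intro s
  induction s with
  | nil => rfl
  | cons c t ih => rw [pv_scanA_cons_none (by simp), ih]

theorem pv_chain : ∀ ks, pvGood ks → ∀ s, pvScanA ks s = ks.foldl (fun acc p => PySem.Chars.replace acc p.1 p.2) s := by
  intro ks
  induction ks with
  | nil => intro _ s; simpa using pv_scan_nil_keys s
  | cons p ks ih =>
    intro hg s
    obtain ⟨hk, h1, h2, h3, hg'⟩ := hg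
    rw [List.foldl_cons, ← ih hg', pv_scan_cons_eq_rep hk (pvNE_of_good ks hg') h1 h2 h3]

-- ---- Bridging B's accumulator scan to pvScanGo over pvAbbrevMap ----
theorem pvAbbrevMap_eq_map : pvAbbrevMap = pvBTable.map (fun e => (e.1.toList, e.2.toList)) := rfl

theorem pv_emit_eq_scan : ∀ (n : Nat) (l acc : List Char),
    pvEmit n l acc = acc.reverse ++ pvScanGo pvAbbrevMap n l := by
  intro n
  induction n with
  | zero =>
    intro l acc
    cases l with
    | nil => simp [pvEmit, pv_scanGo_nil]
    | cons c t => simp [pvEmit, pvScanGo]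
  | succ n ih =>
    intro l acc
    cases l with
    | nil => simp [pvEmit, pv_scanGo_nil]
    | cons c t =>
      rw [pv_scanGo_succ_cons]
      show (match pvBTable.find? (fun e => e.1.toList.isPrefixOf (c :: t)) with
        | some e => pvEmit n (List.drop e.1.toList.length (c :: t)) (e.2.toList.reverse ++ acc)
        | none => pvEmit n t (c :: acc)) = _
      have hmap : pvAbbrevMap.find? (fun p => p.1.isPrefixOf (c :: t)) =
          (pvBTable.find? (fun e => e.1.toList.isPrefixOf (c :: t))).map (fun e => (e.1.toList, e.2.toList)) := by
        rw [pvAbbrevMap_eq_map, List.find?_map]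
        rfl
      cases hf : pvBTable.find? (fun e => e.1.toList.isPrefixOf (c :: t)) with
      | none =>
        rw [hf] at hmap
        simp only [Option.map_none] at hmap
        rw [hmap]
        simp [ih]
      | some e =>
        rw [hf] at hmap
        simp only [Option.map_some] at hmap
        rw [hmap]
        simp [ih]

-- pvClip is exactly Python's abbreviated[:max_length-3].
theorem pv_clip_eq (l : List Char) (m : Int) :
    pvClip l m = PySem.Chars.slice l none (some (m - 3)) := by
  unfold pvClip
  by_cases h : 3 ≤ m
  · rw [if_pos h, PySem.Chars.slice_eq_listSlice, PySem.List.slice_to _ (by omega)]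
  · rw [if_neg h, PySem.Chars.slice_eq_listSlice]
    have hk : 0 < (3 - m).toNat := by omega
    have hm : m - 3 = -((3 - m).toNat : Int) := by omega
    rw [hm, PySem.List.slice_to_neg_natCast _ _ hk]

-- ===== VERDICT (by name: the statement is the Claim_ definition above) =====
theorem abbreviate_service_name_spec : Claim_equal_abbreviate_service_name := by
  intro s ml _
  show _ = _
  unfold abbreviate_service_name abbreviate_service_name_alt
  have hscan : pvEmit s.length s.toList [] =
      pvAbbrevMap.foldl (fun acc p => PySem.Chars.replace acc p.1 p.2) s.toList := by
    rw [pv_emit_eq_scan]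
    rw [List.reverse_nil, List.nil_append, show s.length = s.toList.length from String.length_toList.symm]
    exact pv_chain pvAbbrevMap pvGood_abbrevMap s.toList
  rw [hscan]
  set ab := pvAbbrevMap.foldl (fun acc p => PySem.Chars.replace acc p.1 p.2) s.toList with hab
  by_cases h : (ab.length : Int) ≤ ml
  · rw [if_neg (by omega), if_pos h]
  · rw [if_pos (by omega), if_neg h, pv_clip_eq]
    rfl
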